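-- pv_equiv track=rewrite | github.com/chefmatteo/Metalloproteins | src/enhanced/gromacs_optimizer.py | _analyze_metal_binding_sites
-- ===== SOURCE A (Python) =====
-- from typing import Dict, List, Tuple, Optional
--
-- def _analyze_metal_binding_sites(sequence: str) -> Dict:
--     """Analyze metal binding sites in the sequence."""
--     metal_binding_residues = {
--         'Zn2+': ['C', 'H', 'E', 'D'],
--         'Cu2+': ['C', 'H', 'E', 'D', 'M'],
--         'Fe2+': ['C', 'H', 'E', 'D', 'Y'],
--         'Mg2+': ['E', 'D', 'N', 'Q'],
--         'Ca2+': ['E', 'D', 'N', 'Q', 'S', 'T']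
--     }
--
--     sites = {}
--     for metal, residues in metal_binding_residues.items():
--         positions = []
--         for i, residue in enumerate(sequence):
--             if residue in residues:
--                 positions.append(i)
--         sites[metal] = positions
--
--     return sites
-- ===== SOURCE B (Python) =====
-- def _analyze_metal_binding_sites(sequence: str) -> dict:
--     """Analyze metal binding sites: one pass over the sequence via a reverse residue->metals index."""
--     metal_binding_residues = {
--         'Zn2+': ['C', 'H', 'E', 'D'],
--         'Cu2+': ['C', 'H', 'E', 'D', 'M'],
--         'Fe2+': ['C', 'H', 'E', 'D', 'Y'],
--         'Mg2+': ['E', 'D', 'N', 'Q'],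
--         'Ca2+': ['E', 'D', 'N', 'Q', 'S', 'T']
--     }
--
--     residue_to_metals = {}
--     for metal, residues in metal_binding_residues.items():
--         for r in residues:
--             residue_to_metals.setdefault(r, []).append(metal)
--
--     sites = {metal: [] for metal in metal_binding_residues}
--     for i, ch in enumerate(sequence):
--         for metal in residue_to_metals.get(ch, ()):
--             sites[metal].append(i)
--
--     return sites
-- ===== Notes on version B (the rewrite author's own statement) =====
-- stated objective: faster
-- what changed: Instead of scanning the sequence once per metal (5 passes, each with an inner membership test), B builds a reverse residue-to-metals index from the same table, pre-seeds all metal keys with empty lists, and makes a single enumerate pass over the sequence appending each position to the lists of the metals its residue binds.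
import Mathlib
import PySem

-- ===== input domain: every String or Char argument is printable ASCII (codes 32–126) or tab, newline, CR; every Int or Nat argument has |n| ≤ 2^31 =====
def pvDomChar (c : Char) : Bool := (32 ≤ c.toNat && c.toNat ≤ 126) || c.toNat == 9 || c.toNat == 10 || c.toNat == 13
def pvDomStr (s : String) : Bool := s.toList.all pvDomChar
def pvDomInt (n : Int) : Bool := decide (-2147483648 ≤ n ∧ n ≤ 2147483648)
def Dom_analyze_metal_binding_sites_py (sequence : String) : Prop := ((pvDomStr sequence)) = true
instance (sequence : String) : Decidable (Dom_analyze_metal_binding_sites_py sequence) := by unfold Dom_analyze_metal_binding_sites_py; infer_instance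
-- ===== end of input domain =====

-- B replaces A's five passes over the sequence (one per metal) by a reverse residue→metals
-- index plus a single enumerate pass appending each position to the matching metals' lists.

-- ===== PORT A =====
-- the metal_binding_residues table, in Python's dict insertion order
def pvTable : List (String × List Char) :=
  [("Zn2+", ['C','H','E','D']),
   ("Cu2+", ['C','H','E','D','M']),
   ("Fe2+", ['C','H','E','D','Y']),
   ("Mg2+", ['E','D','N','Q']),
   ("Ca2+", ['E','D','N','Q','S','T'])]

-- the inner 'for i, residue in enumerate(sequence): if residue in residues: positions.append(i)'
def pvScanA (res : List Char) : List Char → Int → List Int → List Int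
  | [], _, acc => acc
  | ch :: cs, i, acc => pvScanA res cs (i + 1) (if ch ∈ res then acc ++ [i] else acc)

def analyze_metal_binding_sites_py (sequence : String) : List (String × List Int) :=
  pvTable.foldl (fun sites p => sites ++ [(p.1, pvScanA p.2 sequence.toList 0 [])]) []

-- ===== PORT B =====
-- reverse index: residue_to_metals via setdefault(r, []).append(metal)
def pvRev : PySem.Dict Char (List String) :=
  pvTable.foldl
    (fun rev p => p.2.foldl (fun r ch => r.insert ch (r.getD ch [] ++ [p.1])) rev)
    PySem.Dict.empty

-- sites[metal].append(i)
def pvUpd (i : Int) (sites : List (String × List Int)) (m : String) : List (String × List Int) :=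
  sites.map (fun q => if q.1 = m then (q.1, q.2 ++ [i]) else q)

-- 'for i, ch in enumerate(sequence): for metal in residue_to_metals.get(ch, ()): sites[metal].append(i)'
def pvScanB : List Char → Int → List (String × List Int) → List (String × List Int)
  | [], _, sites => sites
  | ch :: cs, i, sites => pvScanB cs (i + 1) ((pvRev.getD ch []).foldl (pvUpd i) sites)

def analyze_metal_binding_sites_py_alt (sequence : String) : List (String × List Int) :=
  pvScanB sequence.toList 0 (pvTable.map (fun p => (p.1, ([] : List Int))))

-- ===== PRECONDITION & SPEC =====
def Spec_analyze_metal_binding_sites_py (sequence : String) (out : List (String × List Int)) : Prop := out = analyze_metal_binding_sites_py_alt sequence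
instance (sequence : String) (out : List (String × List Int)) : Decidable (Spec_analyze_metal_binding_sites_py sequence out) := by unfold Spec_analyze_metal_binding_sites_py; infer_instance

-- ===== CLAIM (what is proved, stated in full; the proofs are below) =====
def Claim_equal_analyze_metal_binding_sites_py : Prop := ∀ (sequence : String), Dom_analyze_metal_binding_sites_py sequence → Spec_analyze_metal_binding_sites_py sequence (analyze_metal_binding_sites_py sequence)

-- ===== LEMMAS AND PROOFS =====
-- one step of B's single pass updates the five accumulators exactly as A's five membership tests would
lemma pvStep (ch : Char) (i : Int) (a b c d e : List Int) :
    (pvRev.getD ch []).foldl (pvUpd i)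
      [("Zn2+", a), ("Cu2+", b), ("Fe2+", c), ("Mg2+", d), ("Ca2+", e)] =
    [("Zn2+", if ch ∈ ['C','H','E','D'] then a ++ [i] else a),
     ("Cu2+", if ch ∈ ['C','H','E','D','M'] then b ++ [i] else b),
     ("Fe2+", if ch ∈ ['C','H','E','D','Y'] then c ++ [i] else c),
     ("Mg2+", if ch ∈ ['E','D','N','Q'] then d ++ [i] else d),
     ("Ca2+", if ch ∈ ['E','D','N','Q','S','T'] then e ++ [i] else e)] := by
  by_cases h1 : ch = 'C'; · subst h1; rfl
  by_cases h2 : ch = 'H'; · subst h2; rfl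
  by_cases h3 : ch = 'E'; · subst h3; rfl
  by_cases h4 : ch = 'D'; · subst h4; rfl
  by_cases h5 : ch = 'M'; · subst h5; rfl
  by_cases h6 : ch = 'Y'; · subst h6; rfl
  by_cases h7 : ch = 'N'; · subst h7; rfl
  by_cases h8 : ch = 'Q'; · subst h8; rfl
  by_cases h9 : ch = 'S'; · subst h9; rfl
  by_cases h10 : ch = 'T'; · subst h10; rfl
  simp [pvRev, pvTable, PySem.Dict.getD_eq_get?_getD, List.mem_cons, h1, h2, h3, h4, h5, h6, h7, h8, h9, h10,
        Ne.symm h1, Ne.symm h2, Ne.symm h3, Ne.symm h4, Ne.symm h5,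
        Ne.symm h6, Ne.symm h7, Ne.symm h8, Ne.symm h9, Ne.symm h10,
        PySem.Dict.insert, PySem.Dict.empty, PySem.Dict.get?]

lemma pvScan_eq (cs : List Char) : ∀ (i : Int) (a b c d e : List Int),
    pvScanB cs i [("Zn2+", a), ("Cu2+", b), ("Fe2+", c), ("Mg2+", d), ("Ca2+", e)] =
    [("Zn2+", pvScanA ['C','H','E','D'] cs i a),
     ("Cu2+", pvScanA ['C','H','E','D','M'] cs i b),
     ("Fe2+", pvScanA ['C','H','E','D','Y'] cs i c),
     ("Mg2+", pvScanA ['E','D','N','Q'] cs i d),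
     ("Ca2+", pvScanA ['E','D','N','Q','S','T'] cs i e)] := by
  induction cs with
  | nil => intro i a b c d e; rfl
  | cons ch cs ih =>
    intro i a b c d e
    rw [pvScanB, pvStep, ih]
    rfl

-- ===== VERDICT (by name: the statement is the Claim_ definition above) =====
theorem analyze_metal_binding_sites_py_spec : Claim_equal_analyze_metal_binding_sites_py := by
  intro s _
  show analyze_metal_binding_sites_py s = analyze_metal_binding_sites_py_alt s
  unfold analyze_metal_binding_sites_py analyze_metal_binding_sites_py_alt pvTable
  simp only [List.foldl, List.map]
  rw [pvScan_eq]
  rfl
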